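-- pv_equiv track=rewrite | github.com/GuSt4v0CCAM4/CifradoSimetrico | cifrado_ruta.py | descifrar_por_ruta
-- ===== SOURCE A (Python) =====
-- def descifrar_por_ruta(mensaje_cifrado, filas, columnas):
--     matriz = [['' for _ in range(columnas)] for _ in range(filas)]
--
--     idx = 0
--     for j in range(columnas):
--         for i in range(filas):
--             if idx < len(mensaje_cifrado):
--                 matriz[i][j] = mensaje_cifrado[idx]
--                 idx += 1
--
--     mensaje_descifrado = ''.join(''.join(fila) for fila in matriz)
--
--     return mensaje_descifrado
-- ===== SOURCE B (Python) =====
-- def descifrar_por_ruta(mensaje_cifrado, filas, columnas):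
--     n = len(mensaje_cifrado)
--     return ''.join(mensaje_cifrado[j * filas + i]
--                    for i in range(filas)
--                    for j in range(columnas)
--                    if j * filas + i < n)
-- ===== Notes on version B (the rewrite author's own statement) =====
-- stated objective: simpler
-- what changed: Drops the intermediate 2D matrix: the decoded string is emitted in one row-major pass with the closed-form source index k = j*filas + i, guarded by k < len(mensaje_cifrado).
import Mathlib
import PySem

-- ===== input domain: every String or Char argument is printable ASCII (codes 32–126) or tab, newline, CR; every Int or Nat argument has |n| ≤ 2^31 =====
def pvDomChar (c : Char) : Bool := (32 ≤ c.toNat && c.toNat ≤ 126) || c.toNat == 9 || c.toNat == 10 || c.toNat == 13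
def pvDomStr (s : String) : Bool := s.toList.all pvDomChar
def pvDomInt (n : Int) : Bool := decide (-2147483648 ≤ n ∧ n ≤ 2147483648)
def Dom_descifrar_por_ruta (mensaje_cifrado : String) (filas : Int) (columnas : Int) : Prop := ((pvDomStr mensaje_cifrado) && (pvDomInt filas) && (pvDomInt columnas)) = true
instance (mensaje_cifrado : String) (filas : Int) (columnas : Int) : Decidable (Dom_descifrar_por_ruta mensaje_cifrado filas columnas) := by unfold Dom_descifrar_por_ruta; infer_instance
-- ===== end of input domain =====

-- B drops A's intermediate 2D matrix and emits the decoded string in one row-major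
-- pass using the closed-form source index j*filas + i (objective: simpler).

-- ===== PORT A =====
-- literal port of A: fill a filas×columnas matrix column by column, then join row-wise;
-- a matrix cell is a List Char ([] for Python's '' and [c] for a one-char string)
def descifrar_por_ruta (mensaje_cifrado : String) (filas : Int) (columnas : Int) : String :=
  let s := mensaje_cifrado.toList
  let matriz : List (List (List Char)) :=
    (PySem.List.pyRange 0 filas 1).map (fun _ => (PySem.List.pyRange 0 columnas 1).map (fun _ => ([] : List Char)))
  let st :=
    (PySem.List.pyRange 0 columnas 1).foldl (fun st j =>
      (PySem.List.pyRange 0 filas 1).foldl (fun st i =>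
        if st.2 < (s.length : Int) then
          (st.1.set i.toNat ((st.1.getD i.toNat []).set j.toNat [s.getD st.2.toNat ' ']), st.2 + 1)
        else st) st) (matriz, (0 : Int))
  String.ofList ((st.1.map List.flatten).flatten)

-- ===== PORT B =====
-- literal port of B: one row-major pass, source index j*filas + i, no matrix
def descifrar_por_ruta_alt (mensaje_cifrado : String) (filas : Int) (columnas : Int) : String :=
  let s := mensaje_cifrado.toList
  let n : Int := s.length
  String.ofList ((PySem.List.pyRange 0 filas 1).flatMap (fun i =>
    (PySem.List.pyRange 0 columnas 1).filterMap (fun j =>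
      if j * filas + i < n then some (s.getD (j * filas + i).toNat ' ') else none)))

-- ===== PRECONDITION & SPEC =====
def Spec_descifrar_por_ruta (mensaje_cifrado : String) (filas : Int) (columnas : Int) (out : String) : Prop := out = descifrar_por_ruta_alt mensaje_cifrado filas columnas
instance (mensaje_cifrado : String) (filas : Int) (columnas : Int) (out : String) : Decidable (Spec_descifrar_por_ruta mensaje_cifrado filas columnas out) := by unfold Spec_descifrar_por_ruta; infer_instance

-- ===== CLAIM (what is proved, stated in full; the proofs are below) =====
def Claim_equal_descifrar_por_ruta : Prop := ∀ (mensaje_cifrado : String) (filas : Int) (columnas : Int), Dom_descifrar_por_ruta mensaje_cifrado filas columnas → Spec_descifrar_por_ruta mensaje_cifrado filas columnas (descifrar_por_ruta mensaje_cifrado filas columnas)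

-- ===== LEMMAS AND PROOFS =====

-- the cell (i, j') of A's matrix after the first j columns are fully filled
-- and the first q rows of column j are filled
def pvCell (s : List Char) (F j q i j' : Nat) : List Char :=
  if (j' < j ∨ (j' = j ∧ i < q)) ∧ j' * F + i < s.length then [s.getD (j' * F + i) ' '] else []

def pvM (s : List Char) (F C j q : Nat) : List (List (List Char)) :=
  (List.range F).map (fun i => (List.range C).map (fun j' => pvCell s F j q i j'))

-- A's inner-loop body, expressed on Nat loop indices
def pvStepI (s : List Char) (j : Nat) (st : List (List (List Char)) × Int) (i : Nat) :
    List (List (List Char)) × Int :=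
  if st.2 < (s.length : Int) then
    (st.1.set i ((st.1.getD i []).set j [s.getD st.2.toNat ' ']), st.2 + 1)
  else st

theorem pv_set_map_range {α : Type} (f : Nat → α) (n k : Nat) (v : α) (_h : k < n) :
    ((List.range n).map f).set k v = (List.range n).map (fun i => if i = k then v else f i) := by
  apply List.ext_getElem
  · simp
  · intro i h1 h2
    simp only [List.getElem_set, List.getElem_map, List.getElem_range]
    rcases eq_or_ne k i with h3 | h3
    · rw [if_pos h3, if_pos h3.symm]
    · rw [if_neg h3, if_neg (Ne.symm h3)]

theorem pv_getD_map_range {α : Type} (f : Nat → α) (n k : Nat) (d : α) (h : k < n) :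
    ((List.range n).map f).getD k d = f k := by
  rw [List.getD_eq_getElem?_getD]
  simp [h]

theorem pv_cell_congr (s : List Char) (F : Nat) {j₁ q₁ j₂ q₂ : Nat} (i j' : Nat)
    (h : (j' < j₁ ∨ (j' = j₁ ∧ i < q₁)) ↔ (j' < j₂ ∨ (j' = j₂ ∧ i < q₂))) :
    pvCell s F j₁ q₁ i j' = pvCell s F j₂ q₂ i j' := by
  simp only [pvCell]
  exact if_congr (and_congr_left fun _ => h) rfl rfl

theorem pv_inner (s : List Char) (F C j : Nat) (hj : j < C) :
    ∀ q, q ≤ F →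
      (List.range q).foldl (pvStepI s j) (pvM s F C j 0, ((min s.length (j * F) : Nat) : Int))
        = (pvM s F C j q, ((min s.length (j * F + q) : Nat) : Int)) := by
  intro q
  induction q with
  | zero => intro _; rfl
  | succ q ih =>
    intro hq
    rw [List.range_succ, List.foldl_append, ih (by omega)]
    simp only [List.foldl_cons, List.foldl_nil]
    by_cases hlt : j * F + q < s.length
    · have hmin : min s.length (j * F + q) = j * F + q := by omega
      have hcond : ((min s.length (j * F + q) : Nat) : Int) < (s.length : Int) := by
        rw [hmin]; exact_mod_cast hlt
      simp only [pvStepI]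
      rw [if_pos hcond, Prod.mk.injEq]
      refine ⟨?_, ?_⟩
      · simp only [pvM]
        rw [pv_getD_map_range _ _ _ _ (by omega),
          pv_set_map_range _ _ _ _ hj,
          pv_set_map_range _ _ _ _ (by omega : q < F)]
        apply List.map_congr_left
        intro i hi
        rw [List.mem_range] at hi
        by_cases hiq : i = q
        · subst hiq
          rw [if_pos rfl]
          apply List.map_congr_left
          intro j' hj'
          rw [List.mem_range] at hj'
          by_cases hjj : j' = j
          · subst hjj
            rw [if_pos rfl]
            simp only [pvCell]
            split_ifs with hcnd
            · rw [hmin, Int.toNat_natCast]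
            · exact hcnd ⟨Or.inr ⟨trivial, by omega⟩, hlt⟩
          · rw [if_neg hjj]
            exact pv_cell_congr s F i j' (by omega)
        · rw [if_neg hiq]
          apply List.map_congr_left
          intro j' _
          exact pv_cell_congr s F i j' (by omega)
      · rw [hmin]
        have h1 : min s.length (j * F + (q + 1)) = j * F + q + 1 := by omega
        rw [h1]; push_cast; ring
    · have hmin : min s.length (j * F + q) = s.length := by omega
      have hcond : ¬ ((min s.length (j * F + q) : Nat) : Int) < (s.length : Int) := by
        rw [hmin]; omega
      simp only [pvStepI]
      rw [if_neg hcond, Prod.mk.injEq]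
      refine ⟨?_, ?_⟩
      · simp only [pvM]
        apply List.map_congr_left
        intro i hi
        apply List.map_congr_left
        intro j' hj'
        rw [List.mem_range] at hi hj'
        simp only [pvCell]
        refine if_congr ⟨?_, ?_⟩ rfl rfl
        · rintro ⟨h1 | ⟨rfl, h2⟩, h3⟩
          · exact ⟨Or.inl h1, h3⟩
          · exact ⟨Or.inr ⟨rfl, by omega⟩, h3⟩
        · rintro ⟨h1 | ⟨rfl, h2⟩, h3⟩
          · exact ⟨Or.inl h1, h3⟩
          · exact ⟨Or.inr ⟨rfl, by omega⟩, h3⟩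
      · congr 1; omega

theorem pv_M_shift (s : List Char) (F C j : Nat) :
    pvM s F C j F = pvM s F C (j + 1) 0 := by
  simp only [pvM]
  apply List.map_congr_left
  intro i hi
  apply List.map_congr_left
  intro j' _
  rw [List.mem_range] at hi
  exact pv_cell_congr s F i j' (by omega)

theorem pv_outer (s : List Char) (F C : Nat) :
    ∀ p, p ≤ C →
      (List.range p).foldl (fun st j => (List.range F).foldl (pvStepI s j) st)
          (pvM s F C 0 0, (0 : Int))
        = (pvM s F C p 0, ((min s.length (p * F) : Nat) : Int)) := by
  intro p
  induction p with
  | zero =>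
    intro _
    simp only [List.range_zero, List.foldl_nil, Nat.zero_mul, Nat.min_zero, Nat.cast_zero]
  | succ p ih =>
    intro hp
    rw [List.range_succ, List.foldl_append, ih (by omega)]
    simp only [List.foldl_cons, List.foldl_nil]
    rw [pv_inner s F C p (by omega) F (le_refl F), pv_M_shift]
    have h1 : p * F + F = (p + 1) * F := by ring
    rw [h1]

theorem pv_M_init (s : List Char) (F C : Nat) :
    (List.range F).map (fun _ => (List.range C).map (fun _ => ([] : List Char)))
      = pvM s F C 0 0 := by
  simp only [pvM]
  apply List.map_congr_left
  intro i _
  apply List.map_congr_left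
  intro j' _
  simp [pvCell]

-- ===== VERDICT (by name: the statement is the Claim_ definition above) =====
theorem descifrar_por_ruta_spec : Claim_equal_descifrar_por_ruta := by
  intro m filas columnas _
  unfold Spec_descifrar_por_ruta descifrar_por_ruta descifrar_por_ruta_alt
  by_cases hF : filas ≤ 0
  · have hr : PySem.List.pyRange 0 filas 1 = [] := by
      simp [PySem.List.pyRange_one, Int.toNat_of_nonpos hF]
    simp [hr]
  · by_cases hC : columnas ≤ 0
    · have hr : PySem.List.pyRange 0 columnas 1 = [] := by
        simp [PySem.List.pyRange_one, Int.toNat_of_nonpos hC]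
      simp [hr, List.flatMap_def]
    · rw [not_le] at hF hC
      set s := m.toList with hs
      obtain ⟨F, hFe⟩ : ∃ F : Nat, filas = (F : Int) := ⟨filas.toNat, by omega⟩
      obtain ⟨C, hCe⟩ : ∃ C : Nat, columnas = (C : Int) := ⟨columnas.toNat, by omega⟩
      subst hFe hCe
      rw [PySem.List.pyRange_zero_nat F, PySem.List.pyRange_zero_nat C]
      simp only [List.foldl_map, List.flatMap_map, List.filterMap_map, List.map_map,
        Function.comp_def, Int.toNat_natCast]
      have hA : (fun (st : List (List (List Char)) × Int) (j : Nat) =>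
          List.foldl (fun (st : List (List (List Char)) × Int) (i : Nat) =>
            if st.2 < (s.length : Int) then
              (st.1.set i ((st.1.getD i []).set j [s.getD st.2.toNat ' ']), st.2 + 1)
            else st) st (List.range F))
          = (fun st j => List.foldl (pvStepI s j) st (List.range F)) := rfl
      rw [hA, pv_M_init s F C, pv_outer s F C C (le_refl C)]
      simp only [pvM, List.map_map, Function.comp_def]
      rw [← List.flatMap_def, List.flatMap_def, List.flatMap_def]
      congr 1
      congr 1
      apply List.map_congr_left
      intro i _
      rw [List.filterMap_eq_flatMap_toList, List.flatMap_def]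
      congr 1
      apply List.map_congr_left
      intro j' hj'
      rw [List.mem_range] at hj'
      simp only [pvCell]
      have hto : ((j' : Int) * (F : Int) + (i : Int)).toNat = j' * F + i := by
        omega
      by_cases hlt : j' * F + i < s.length
      · rw [if_pos ⟨Or.inl hj', hlt⟩, if_pos (by exact_mod_cast hlt), hto]
        rfl
      · rw [if_neg (fun h => hlt h.2), if_neg (by omega)]
        rfl
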